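-- pv_equiv track=rewrite | github.com/StevenVollmer/EECS545_HLSVZ | SWE-agent/custom_cases/digest_preview/repo/app/utils/text.py | classify_name_shape
-- ===== SOURCE A (Python) =====
-- NAME_JOINERS = {"-", "'", "/"}
--
-- def collapse_outer_whitespace(value: str) -> str:
--     return value.strip()
--
-- def classify_name_shape(value: str) -> str:
--     cleaned = collapse_outer_whitespace(value)
--     if not cleaned:
--         return "empty"
--     if any(joiner in cleaned for joiner in NAME_JOINERS):
--         return "compound"
--     if " " in cleaned:
--         return "multi_word"
--     return "simple"
-- ===== SOURCE B (Python) =====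
-- NAME_JOINERS = {"-", "'", "/"}
--
-- _SHAPES = ("simple", "multi_word", "compound")
--
-- def classify_name_shape(value):
--     cleaned = value.strip()
--     if not cleaned:
--         return "empty"
--     # severity lattice: joiner=2 > space=1 > other=0; the shape is the max severity
--     rank = max(2 if ch in NAME_JOINERS else (1 if ch == " " else 0) for ch in cleaned)
--     return _SHAPES[rank]
-- ===== Notes on version B (the rewrite author's own statement) =====
-- stated objective: alternative
-- what changed: Replaces A's staged membership tests and early-return chain with a severity-lattice reduction: each character is mapped to a numeric rank (joiner=2, space=1, other=0), the ranks are reduced with max in one pass, and the shape name is read off a table indexed by the maximum rank.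
import Mathlib
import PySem

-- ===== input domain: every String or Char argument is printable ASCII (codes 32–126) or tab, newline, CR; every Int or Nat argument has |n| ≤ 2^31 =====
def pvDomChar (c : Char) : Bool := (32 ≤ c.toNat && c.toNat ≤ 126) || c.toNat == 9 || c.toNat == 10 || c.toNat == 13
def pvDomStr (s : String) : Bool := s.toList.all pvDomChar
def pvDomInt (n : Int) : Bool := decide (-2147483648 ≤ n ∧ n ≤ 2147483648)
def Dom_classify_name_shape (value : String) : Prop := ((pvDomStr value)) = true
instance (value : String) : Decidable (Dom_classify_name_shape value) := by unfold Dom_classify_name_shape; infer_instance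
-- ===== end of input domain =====

-- B replaces A's staged membership tests with a severity-lattice max-reduction (joiner=2, space=1, other=0) plus a table lookup.

-- ===== PORT A =====
def classify_name_shape (value : String) : String :=
  let cleaned := PySem.Str.strip value
  if cleaned.toList = [] then "empty"
  else if PySem.Str.isIn "-" cleaned || PySem.Str.isIn "'" cleaned || PySem.Str.isIn "/" cleaned then
    "compound"
  else if PySem.Str.isIn " " cleaned then "multi_word"
  else "simple"

-- ===== PORT B =====
-- per-character severity rank: joiner = 2, space = 1, other = 0
def pvRank (ch : Char) : Nat :=
  if ch == '-' || ch == '\'' || ch == '/' then 2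
  else if ch == ' ' then 1 else 0

def classify_name_shape_alt (value : String) : String :=
  match (PySem.Str.strip value).toList with
  | [] => "empty"
  | c :: cs =>
    -- max over the nonempty generator, seeded with the first element's rank
    let rank := (cs.map pvRank).foldl Nat.max (pvRank c)
    -- rank ≤ 2 always, so the table lookup never misses; "" is unreachable
    (PySem.List.pyGet? ["simple", "multi_word", "compound"] (rank : Int)).getD ""

-- ===== PRECONDITION & SPEC =====
def Spec_classify_name_shape (value : String) (out : String) : Prop := out = classify_name_shape_alt value
instance (value : String) (out : String) : Decidable (Spec_classify_name_shape value out) := by unfold Spec_classify_name_shape; infer_instance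

-- ===== CLAIM (what is proved, stated in full; the proofs are below) =====
def Claim_equal_classify_name_shape : Prop := ∀ (value : String), Dom_classify_name_shape value → Spec_classify_name_shape value (classify_name_shape value)

-- ===== LEMMAS AND PROOFS =====

def pvMaxRank (l : List Char) : Nat :=
  if l.any (fun ch => ch == '-' || ch == '\'' || ch == '/') then 2
  else if l.any (fun ch => ch == ' ') then 1 else 0

theorem maxfold (l : List Char) (a : Nat) :
    (l.map pvRank).foldl Nat.max a = Nat.max a (pvMaxRank l) := by
  induction l generalizing a with
  | nil => simp [pvMaxRank]
  | cons c cs ih =>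
    simp only [List.map_cons, List.foldl_cons, ih]
    have h2 : pvMaxRank (c :: cs) = Nat.max (pvRank c) (pvMaxRank cs) := by
      unfold pvMaxRank pvRank
      simp only [List.any_cons]
      by_cases h1 : (c == '-' || c == '\'' || c == '/') = true
      · simp only [h1, Bool.true_or, if_pos]
        split_ifs <;> simp_all [Nat.max_def]
      · have hns : ((c == '-' || c == '\'' || c == '/') = false) := by simpa using h1
        simp only [hns, Bool.false_or]
        by_cases h2 : (c == ' ') = true
        · simp only [h2, Bool.true_or, if_true]
          split_ifs <;> simp_all [Nat.max_def]
        · simp only [Bool.not_eq_true] at h2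
          simp only [h2, Bool.false_or]
          split_ifs <;> simp_all [Nat.max_def]
    rw [h2]
    exact Nat.max_assoc a (pvRank c) (pvMaxRank cs)

-- single-character substring test = character membership
theorem isIn_single (c : Char) (s : String) :
    PySem.Str.isIn (String.ofList [c]) s = s.toList.contains c := by
  by_cases hc : c ∈ s.toList
  · have : PySem.Str.isIn (String.ofList [c]) s = true :=
      (PySem.Str.isIn_iff_infix _ s).2 (by simpa using (List.singleton_infix_iff c s.toList).2 hc)
    simp only [List.contains_eq_mem, hc, decide_true]
    simpa using this
  · have : PySem.Str.isIn (String.ofList [c]) s ≠ true := fun h =>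
      hc ((List.singleton_infix_iff c s.toList).1 (by simpa using (PySem.Str.isIn_iff_infix _ s).1 h))
    simp only [Bool.not_eq_true] at this
    simp only [List.contains_eq_mem, hc, decide_false]
    simpa using this

theorem any_joiner_eq (l : List Char) :
    (l.contains '-' || l.contains '\'' || l.contains '/')
      = l.any (fun ch => ch == '-' || ch == '\'' || ch == '/') := by
  rw [Bool.eq_iff_iff]
  simp only [List.any_eq_true, Bool.or_eq_true, beq_iff_eq, List.contains_eq_mem,
    decide_eq_true_eq]
  constructor
  · rintro ((h | h) | h) <;> exact ⟨_, h, by simp⟩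
  · rintro ⟨x, hx, (h | h) | h⟩ <;> subst h <;> simp [hx]

-- ===== VERDICT (by name: the statement is the Claim_ definition above) =====
theorem classify_name_shape_spec : Claim_equal_classify_name_shape := by
  unfold Claim_equal_classify_name_shape
  intro value _
  unfold Spec_classify_name_shape classify_name_shape classify_name_shape_alt
  set s := PySem.Str.strip value with hs
  cases hsl : s.toList with
  | nil => simp [hsl]
  | cons c cs =>
    simp only [hsl, maxfold]
    have hrank : Nat.max (pvRank c) (pvMaxRank cs) = pvMaxRank (c :: cs) := by
      have := maxfold (c :: cs) 0
      simp only [List.map_cons, List.foldl_cons, maxfold, Nat.max_comm 0, Nat.max_zero] at this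
      exact this
    rw [hrank]
    have h1 : PySem.Str.isIn "-" s = s.toList.contains '-' := isIn_single '-' s
    have h2 : PySem.Str.isIn "'" s = s.toList.contains '\'' := isIn_single '\'' s
    have h3 : PySem.Str.isIn "/" s = s.toList.contains '/' := isIn_single '/' s
    have h4 : PySem.Str.isIn " " s = s.toList.contains ' ' := isIn_single ' ' s
    have hsp : s.toList.contains ' ' = s.toList.any (fun ch => ch == ' ') :=
      List.any_beq'.symm
    have hne : ¬ (s.toList = []) := by simp [hsl]
    simp only [h1, h2, h3, h4]
    rw [Bool.or_assoc] at *
    rw [show (s.toList.contains '-' || (s.toList.contains '\'' || s.toList.contains '/'))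
        = s.toList.any (fun ch => ch == '-' || ch == '\'' || ch == '/') from by
      rw [← any_joiner_eq]; simp [Bool.or_assoc]]
    rw [hsp, hsl]
    unfold pvMaxRank
    split_ifs <;> simp_all [PySem.List.pyGet?, PySem.List.pyIdx?]
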